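-- pv_equiv track=rewrite | github.com/devanshg-enixta/Smaartpulse-db | smaartpulse-api/smaartpulse/utils.py | valid_phrase_search
-- ===== SOURCE A (Python) =====
-- def valid_phrase_search(tokens, all_phrases_dict, window):
--     """It searches for all the phrases in tokens within window length
--      which are present in all_phrases_dict
--     :param tokens: list of words in sentence after tokenizing
--     :param all_phrases_dict: dict of all the aspects and sentiments lexicons
--     :param window: window size
--     :return: dict with keys as phrases found in tokens
--     """
--
--     temp_dict = dict()
--
--     #print all_phrases_dict
--     # Modifying the code to incorporate uni-grams
--     for i, start_token in enumerate(tokens[0:]):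
--         # starting the range from zero to incorporate uni-grams
--         for j in range(0, window):
--             if i + j + 1 <= len(tokens):
--                 new_string = " ".join(tokens[i:i + j + 1])
--                # print new_string
--                 if new_string in all_phrases_dict:
--                    # print new_string,'---->',all_phrases_dict[new_string]
--                     temp_dict[new_string] = all_phrases_dict[new_string]
--
--     return temp_dict
-- ===== SOURCE B (Python) =====
-- def valid_phrase_search(tokens, all_phrases_dict, window):
--     """Prefix-indexed search: precompute the set of all string prefixes of the
--     phrase keys once, then grow each candidate n-gram incrementally and stop a
--     start position early as soon as the grown string is no longer a prefix of
--     any phrase."""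
--     prefixes = set()
--     for k in all_phrases_dict:
--         for t in range(len(k) + 1):
--             prefixes.add(k[:t])
--     result = {}
--     for i in range(len(tokens)):
--         s = None
--         for tok in tokens[i:i + max(window, 0)]:
--             s = tok if s is None else s + " " + tok
--             if s not in prefixes:
--                 break
--             if s in all_phrases_dict:
--                 result[s] = all_phrases_dict[s]
--     return result
-- ===== Notes on version B (the rewrite author's own statement) =====
-- stated objective: faster
-- what changed: Instead of re-joining and looking up every n-gram of every length at every start (O(n*window^2) string work), B precomputes the set of all string prefixes of the phrase keys once, then grows each candidate incrementally (one concatenation per step) and breaks out of a start position as soon as the grown string is no longer a prefix of any phrase.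
import Mathlib
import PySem

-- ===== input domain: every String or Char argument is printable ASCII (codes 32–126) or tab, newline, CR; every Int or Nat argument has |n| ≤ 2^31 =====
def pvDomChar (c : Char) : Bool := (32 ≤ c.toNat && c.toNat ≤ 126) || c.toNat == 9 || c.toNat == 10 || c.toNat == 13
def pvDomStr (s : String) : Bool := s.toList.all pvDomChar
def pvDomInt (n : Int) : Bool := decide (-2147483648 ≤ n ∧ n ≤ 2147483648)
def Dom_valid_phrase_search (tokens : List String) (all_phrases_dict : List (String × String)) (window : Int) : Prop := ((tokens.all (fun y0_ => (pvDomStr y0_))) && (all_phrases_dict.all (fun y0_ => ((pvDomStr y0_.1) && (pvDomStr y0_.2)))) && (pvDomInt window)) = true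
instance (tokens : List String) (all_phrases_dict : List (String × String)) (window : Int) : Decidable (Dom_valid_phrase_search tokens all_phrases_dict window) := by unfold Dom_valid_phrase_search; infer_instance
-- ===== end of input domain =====

-- B replaces A's rebuild-and-look-up of every n-gram by a precomputed set of all
-- string prefixes of the phrase keys, growing each candidate incrementally and
-- stopping a start position early once it can no longer extend to any phrase.

-- ===== PORT A =====
def valid_phrase_search (tokens : List String) (all_phrases_dict : List (String × String)) (window : Int) : List (String × String) :=
  let all : PySem.Dict String String := PySem.Dict.mk all_phrases_dict
  let temp : PySem.Dict String String :=
    (PySem.List.enumerate tokens).foldl (fun acc p =>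
      (PySem.List.pyRange 0 window 1).foldl (fun acc j =>
        if p.1 + j + 1 ≤ PySem.List.len tokens then
          let new_string := PySem.Str.join " " (PySem.List.slice tokens (some p.1) (some (p.1 + j + 1)))
          if all.contains new_string then acc.insert new_string (all.getD new_string "") else acc
        else acc) acc) PySem.Dict.empty
  temp.items

-- ===== PORT B =====
-- the set of all string prefixes of the phrase keys (Source B's `prefixes`)
def pvPrefixSet (all_phrases_dict : List (String × String)) : PySem.Set String :=
  all_phrases_dict.foldl (fun pre kv =>
    (PySem.List.pyRange 0 (PySem.Str.len kv.1 + 1) 1).foldl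
      (fun pre t => pre.add (PySem.Str.slice kv.1 none (some t))) pre) PySem.Set.empty

-- Source B's inner loop: grow `s` token by token, break as soon as it is not a prefix
def pvWalk (all : PySem.Dict String String) (pre : PySem.Set String)
    (s : Option String) (seg : List String) (acc : PySem.Dict String String) : PySem.Dict String String :=
  match seg with
  | [] => acc
  | tok :: rest =>
    let s' := match s with | none => tok | some u => u ++ " " ++ tok
    if pre.contains s' then
      pvWalk all pre (some s') rest
        (if all.contains s' then acc.insert s' (all.getD s' "") else acc)
    else acc

def valid_phrase_search_alt (tokens : List String) (all_phrases_dict : List (String × String)) (window : Int) : List (String × String) :=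
  let pre := pvPrefixSet all_phrases_dict
  let all : PySem.Dict String String := PySem.Dict.mk all_phrases_dict
  let res : PySem.Dict String String :=
    (List.range tokens.length).foldl (fun acc (i : Nat) =>
      pvWalk all pre none
        (PySem.List.slice tokens (some (i : Int)) (some ((i : Int) + max window 0))) acc)
      PySem.Dict.empty
  res.items

-- ===== PRECONDITION & SPEC =====
def Spec_valid_phrase_search (tokens : List String) (all_phrases_dict : List (String × String)) (window : Int) (out : List (String × String)) : Prop := out = valid_phrase_search_alt tokens all_phrases_dict window
instance (tokens : List String) (all_phrases_dict : List (String × String)) (window : Int) (out : List (String × String)) : Decidable (Spec_valid_phrase_search tokens all_phrases_dict window out) := by unfold Spec_valid_phrase_search; infer_instance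

-- ===== CLAIM (what is proved, stated in full; the proofs are below) =====
def Claim_equal_valid_phrase_search : Prop := ∀ (tokens : List String) (all_phrases_dict : List (String × String)) (window : Int), Dom_valid_phrase_search tokens all_phrases_dict window → Spec_valid_phrase_search tokens all_phrases_dict window (valid_phrase_search tokens all_phrases_dict window)

-- ===== LEMMAS AND PROOFS =====

-- abbreviations used only by the proofs
def pvJ (p : List String) : String := PySem.Str.join " " p

def pvStep (all : PySem.Dict String String) (acc : PySem.Dict String String) (s : String) : PySem.Dict String String :=
  if all.contains s then acc.insert s (all.getD s "") else acc

def pvOptJ (p : List String) : Option String :=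
  match p with
  | [] => none
  | _ :: _ => some (pvJ p)

-- join over a snoc
theorem pv_chars_join_snoc (sep : List Char) (p : List (List Char)) (c : List Char) (h : p ≠ []) :
    PySem.Chars.join sep (p ++ [c]) = PySem.Chars.join sep p ++ sep ++ c := by
  induction p with
  | nil => exact absurd rfl h
  | cons a rest ih =>
    cases rest with
    | nil => simp [PySem.Chars.join_cons_cons, PySem.Chars.join_singleton]
    | cons b r =>
      have := ih (by simp)
      simp only [List.cons_append, PySem.Chars.join_cons_cons] at *
      rw [this]
      simp [List.append_assoc]

theorem pv_join_snoc (p : List String) (t : String) (h : p ≠ []) :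
    pvJ (p ++ [t]) = pvJ p ++ " " ++ t := by
  rw [← String.toList_inj]
  simp only [pvJ, PySem.Str.toList_join, String.toList_append, List.map_append, List.map_cons,
    List.map_nil]
  exact pv_chars_join_snoc " ".toList (p.map String.toList) t.toList (by simpa using h)

theorem pv_join_singleton (t : String) : pvJ [t] = t := by
  rw [← String.toList_inj]
  simp [pvJ, PySem.Str.toList_join, PySem.Chars.join_singleton]

theorem pv_join_prefix (q p : List String) (h : p ≠ []) :
    (pvJ p).toList <+: (pvJ (p ++ q)).toList := by
  induction q generalizing p with
  | nil => simp
  | cons x xs ih =>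
    have h1 : (pvJ p).toList <+: (pvJ (p ++ [x])).toList := by
      rw [pv_join_snoc p x h]
      simp only [String.toList_append]
      exact (List.prefix_append _ _).trans (List.prefix_append _ _)
    have h2 := ih (p ++ [x]) (by simp)
    simpa [List.append_assoc] using h1.trans h2

-- membership in the prefix set is exactly "string prefix of some key"
theorem pv_mem_prefixSet_aux (apd : List (String × String)) (s0 : PySem.Set String) (y : String) :
    y ∈ apd.foldl (fun pre kv =>
        (PySem.List.pyRange 0 (PySem.Str.len kv.1 + 1) 1).foldl
          (fun pre t => pre.add (PySem.Str.slice kv.1 none (some t))) pre) s0 ↔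
      y ∈ s0 ∨ ∃ kv ∈ apd, y.toList <+: kv.1.toList := by
  induction apd generalizing s0 with
  | nil => simp
  | cons kv rest ih =>
    rw [List.foldl_cons, ih]
    have hinner : y ∈ (PySem.List.pyRange 0 (PySem.Str.len kv.1 + 1) 1).foldl
        (fun pre t => pre.add (PySem.Str.slice kv.1 none (some t))) s0 ↔
        y ∈ s0 ∨ y.toList <+: kv.1.toList := by
      rw [PySem.Set.mem_foldl_add]
      constructor
      · rintro (h | ⟨t, ht, rfl⟩)
        · exact Or.inl h
        · right
          rw [PySem.List.mem_pyRange_one] at ht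
          have : (PySem.Str.slice kv.1 none (some t)).toList = kv.1.toList.take t.toNat := by
            rw [PySem.Str.toList_slice, PySem.Chars.slice_eq_listSlice,
              PySem.List.slice_to _ ht.1]
          rw [this]
          exact List.take_prefix _ _
        
      · rintro (h | h)
        · exact Or.inl h
        · right
          refine ⟨(y.toList.length : Int), ?_, ?_⟩
          · rw [PySem.List.mem_pyRange_one]
            have hle : y.toList.length ≤ kv.1.toList.length := h.length_le
            rw [PySem.Str.len_eq]
            omega
          · rw [← String.toList_inj]
            rw [PySem.Str.toList_slice, PySem.Chars.slice_eq_listSlice,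
              PySem.List.slice_to _ (by positivity)]
            simp only [Int.toNat_natCast]
            exact (List.prefix_iff_eq_take.mp h)
    rw [hinner]
    constructor
    · rintro (⟨h | h⟩ | ⟨kv', hkv', hp⟩)
      · exact Or.inl h
      · exact Or.inr ⟨kv, by simp, h⟩
      · exact Or.inr ⟨kv', by simp [hkv'], hp⟩
    · rintro (h | ⟨kv', hkv', hp⟩)
      · exact Or.inl (Or.inl h)
      · rcases List.mem_cons.mp hkv' with rfl | hmem
        · exact Or.inl (Or.inr hp)
        · exact Or.inr ⟨kv', hmem, hp⟩

theorem pv_mem_prefixSet (apd : List (String × String)) (y : String) :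
    y ∈ pvPrefixSet apd ↔ ∃ kv ∈ apd, y.toList <+: kv.1.toList := by
  rw [pvPrefixSet, pv_mem_prefixSet_aux]
  simp [PySem.Set.empty]

theorem pv_contains_mk_iff (apd : List (String × String)) (s : String) :
    (PySem.Dict.mk apd).contains s = true ↔ ∃ kv ∈ apd, kv.1 = s := by
  rw [PySem.Dict.contains_mk]
  simp [List.any_eq_true]

-- a string prefix of a key is in the prefix set
theorem pv_pre_of_key (apd : List (String × String)) (s S : String)
    (hk : (PySem.Dict.mk apd).contains S = true) (hp : s.toList <+: S.toList) :
    (pvPrefixSet apd).contains s = true := by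
  rw [PySem.Set.contains_iff, pv_mem_prefixSet]
  rcases (pv_contains_mk_iff apd S).mp hk with ⟨kv, hkv, rfl⟩
  exact ⟨kv, hkv, hp⟩

-- the walk with break equals the full fold over all prefixes of the segment
theorem pv_walk_spec (apd : List (String × String)) (seg : List String) :
    ∀ (p : List String) (acc : PySem.Dict String String),
    pvWalk (PySem.Dict.mk apd) (pvPrefixSet apd) (pvOptJ p) seg acc
      = (List.range seg.length).foldl
          (fun acc j => pvStep (PySem.Dict.mk apd) acc (pvJ (p ++ seg.take (j + 1)))) acc := by
  induction seg with
  | nil => intro p acc; simp [pvWalk]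
  | cons tok rest ih =>
    intro p acc
    have hs' : (match pvOptJ p with | none => tok | some u => u ++ " " ++ tok)
        = pvJ (p ++ [tok]) := by
      cases p with
      | nil => simp [pvOptJ, pv_join_singleton]
      | cons a as =>
        show pvJ (a :: as) ++ " " ++ tok = pvJ ((a :: as) ++ [tok])
        rw [pv_join_snoc (a :: as) tok (by simp)]
    simp only [pvWalk, hs']
    by_cases h : (pvPrefixSet apd).contains (pvJ (p ++ [tok])) = true
    · rw [if_pos h]
      have hopt : pvOptJ (p ++ [tok]) = some (pvJ (p ++ [tok])) := by
        cases p <;> rfl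
      rw [← hopt, ih (p ++ [tok])]
      rw [List.length_cons, List.range_succ_eq_map, List.foldl_cons, List.foldl_map]
      have hfirst : pvStep (PySem.Dict.mk apd) acc (pvJ (p ++ (tok :: rest).take (0 + 1)))
          = (if (PySem.Dict.mk apd).contains (pvJ (p ++ [tok])) = true then
              (PySem.Dict.mk apd).getD (pvJ (p ++ [tok])) "" |> acc.insert (pvJ (p ++ [tok]))
            else acc) := by
        simp [pvStep]
      rw [hfirst]
      refine PySem.List.foldl_congr_mem _ _ _ _ ?_
      intro acc' j _
      have : (p ++ [tok]) ++ rest.take (j + 1) = p ++ (tok :: rest).take (Nat.succ j + 1) := by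
        simp [List.take_succ_cons, List.append_assoc]
      rw [this]
    · rw [if_neg h]
      have hnoop : ∀ (acc' : PySem.Dict String String), ∀ j ∈ List.range (tok :: rest).length,
          pvStep (PySem.Dict.mk apd) acc' (pvJ (p ++ (tok :: rest).take (j + 1))) = acc' := by
        intro acc' j _
        have htake : p ++ (tok :: rest).take (j + 1) = (p ++ [tok]) ++ rest.take j := by
          simp [List.take_succ_cons, List.append_assoc]
        have hcont : (PySem.Dict.mk apd).contains (pvJ (p ++ (tok :: rest).take (j + 1))) = false := by
          by_contra hc
          have hc' : (PySem.Dict.mk apd).contains (pvJ (p ++ (tok :: rest).take (j + 1))) = true := by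
            revert hc; cases (PySem.Dict.mk apd).contains (pvJ (p ++ (tok :: rest).take (j + 1))) <;> simp
          have hpre : (pvJ (p ++ [tok])).toList <+: (pvJ (p ++ (tok :: rest).take (j + 1))).toList := by
            rw [htake]
            exact pv_join_prefix (rest.take j) (p ++ [tok]) (by simp)
          exact h (pv_pre_of_key apd _ _ hc' hpre)
        simp only [pvStep, hcont, Bool.false_eq_true, if_false]
      rw [PySem.List.foldl_congr_mem _ _ (fun acc _ => acc) _ hnoop, PySem.List.foldl_ignore]

-- guarded fold over range w = fold over range (min w m)
theorem pv_foldl_range_guard {β : Type} (g : β → Nat → β) (m : Nat) :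
    ∀ (w : Nat) (acc : β),
    (List.range w).foldl (fun acc k => if k < m then g acc k else acc) acc
      = (List.range (min w m)).foldl g acc := by
  intro w
  induction w with
  | zero => intro acc; simp
  | succ w ih =>
    intro acc
    by_cases h : w < m
    · have hmin : min (w + 1) m = min w m + 1 := by omega
      have hw : min w m = w := by omega
      rw [List.range_succ, List.foldl_append, ih, hmin, List.range_succ, List.foldl_append]
      simp [hw, h]
    · have hmin : min (w + 1) m = min w m := by omega
      rw [List.range_succ, List.foldl_append, ih, hmin]
      simp [h]

-- A's inner loop, written with the proof abbreviations (definitionally equal to the port's body)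
def pvInnerA (tokens : List String) (apd : List (String × String)) (window : Int)
    (acc : PySem.Dict String String) (ii : Int) : PySem.Dict String String :=
  (PySem.List.pyRange 0 window 1).foldl (fun acc j =>
    if ii + j + 1 ≤ PySem.List.len tokens then
      pvStep (PySem.Dict.mk apd) acc
        (pvJ (PySem.List.slice tokens (some ii) (some (ii + j + 1))))
    else acc) acc

theorem pv_foldl_enumerate {β : Type} (g : β → Int → β) :
    ∀ (l : List String) (k : Int) (init : β),
    (PySem.List.enumerate l k).foldl (fun acc p => g acc p.1) init
      = (List.range l.length).foldl (fun acc (j : Nat) => g acc (k + j)) init := by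
  intro l
  induction l with
  | nil => intro k init; rfl
  | cons x xs ih =>
    intro k init
    show ((k, x) :: PySem.List.enumerate xs (k + 1)).foldl (fun acc p => g acc p.1) init = _
    rw [List.foldl_cons, ih, List.length_cons, List.range_succ_eq_map, List.foldl_cons,
      List.foldl_map]
    have hinit : g init (k, x).1 = g init (k + ((0 : Nat) : Int)) := by norm_num
    rw [hinit]
    refine PySem.List.foldl_congr_mem _ _ _ _ ?_
    intro acc j _
    show g acc (k + 1 + (j : Int)) = g acc (k + (Nat.succ j : Nat))
    congr 1
    push_cast
    ring

theorem pv_pyRange_fold {β : Type} (w : Int) (f : β → Int → β) (init : β) :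
    (PySem.List.pyRange 0 w 1).foldl f init
      = (List.range w.toNat).foldl (fun acc (k : Nat) => f acc (k : Int)) init := by
  rw [PySem.List.pyRange_one, List.foldl_map]
  simp only [zero_add, sub_zero]

theorem pv_inner_eq (tokens : List String) (apd : List (String × String)) (window : Int)
    (i : Nat) (hi : i < tokens.length) (acc : PySem.Dict String String) :
    pvInnerA tokens apd window acc (i : Int)
      = pvWalk (PySem.Dict.mk apd) (pvPrefixSet apd) none
          (PySem.List.slice tokens (some (i : Int)) (some ((i : Int) + max window 0))) acc := by
  by_cases hw : window ≤ 0
  · have hmax : (i : Int) + max window 0 = ((i : Nat) : Int) := by omega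
    rw [pvInnerA, PySem.List.pyRange_one_eq_nil hw, hmax, PySem.List.slice_natCast]
    simp [pvWalk]
  · push Not at hw
    have hmax : (i : Int) + max window 0 = ((i + window.toNat : Nat) : Int) := by
      push_cast; omega
    rw [pvInnerA, pv_pyRange_fold, hmax, PySem.List.slice_natCast]
    have hsub : i + window.toNat - i = window.toNat := by omega
    rw [hsub]
    have hDlen : (tokens.drop i).length = tokens.length - i := List.length_drop
    refine Eq.trans (PySem.List.foldl_congr_mem _ _
      (fun acc' (k : Nat) => if k < (tokens.drop i).length then
          pvStep (PySem.Dict.mk apd) acc' (pvJ ((tokens.drop i).take (k + 1))) else acc') acc ?_) ?_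
    · intro acc' k _
      show (if (i : Int) + (k : Int) + 1 ≤ PySem.List.len tokens then
          pvStep (PySem.Dict.mk apd) acc'
            (pvJ (PySem.List.slice tokens (some (i : Int)) (some ((i : Int) + (k : Int) + 1))))
        else acc') = _
      beta_reduce
      rw [PySem.List.len_eq]
      by_cases hk : k < (tokens.drop i).length
      · have hc : (i : Int) + (k : Int) + 1 ≤ (tokens.length : Int) := by
          rw [hDlen] at hk; omega
        have hcast : (i : Int) + (k : Int) + 1 = ((i + k + 1 : Nat) : Int) := by push_cast; ring
        rw [if_pos hc, if_pos hk, hcast, PySem.List.slice_natCast]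
        have h2 : i + k + 1 - i = k + 1 := by omega
        rw [h2]
      · have hc : ¬ ((i : Int) + (k : Int) + 1 ≤ (tokens.length : Int)) := by
          rw [hDlen] at hk; omega
        rw [if_neg hc, if_neg hk]
    · rw [pv_foldl_range_guard]
      have hwalk := pv_walk_spec apd ((tokens.drop i).take window.toNat) [] acc
      simp only [pvOptJ, List.nil_append] at hwalk
      rw [hwalk, List.length_take]
      refine PySem.List.foldl_congr_mem _ _ _ _ ?_
      intro acc' k hk
      have hk' : k + 1 ≤ window.toNat := by
        have := List.mem_range.mp hk; omega
      rw [List.take_take, Nat.min_eq_left hk']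

-- ===== VERDICT (by name: the statement is the Claim_ definition above) =====
theorem valid_phrase_search_spec : Claim_equal_valid_phrase_search := by
  unfold Claim_equal_valid_phrase_search
  intro tokens apd window _
  unfold Spec_valid_phrase_search
  show (PySem.Dict.items
      ((PySem.List.enumerate tokens).foldl (fun acc p => pvInnerA tokens apd window acc p.1)
        PySem.Dict.empty))
    = valid_phrase_search_alt tokens apd window
  rw [pv_foldl_enumerate (pvInnerA tokens apd window) tokens 0]
  simp only [zero_add]
  show _ = PySem.Dict.items
      ((List.range tokens.length).foldl (fun acc (i : Nat) =>
        pvWalk (PySem.Dict.mk apd) (pvPrefixSet apd) none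
          (PySem.List.slice tokens (some (i : Int)) (some ((i : Int) + max window 0))) acc)
        PySem.Dict.empty)
  refine congrArg PySem.Dict.items ?_
  refine PySem.List.foldl_congr_mem _ _ _ _ ?_
  intro acc i hi
  exact pv_inner_eq tokens apd window i (List.mem_range.mp hi) acc
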